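-- pv_equiv track=rewrite | github.com/Tuguldur0107/RZR_bot_v5 | RZR_bot_v5.1.py | assign_greedy
-- ===== SOURCE A (Python) =====
-- def assign_greedy(scores, team_count, players_per_team):
--     teams = [[] for _ in range(team_count)]
--     team_totals = [0] * team_count
--     for s in scores:
--         idx = min(range(team_count), key=lambda i: (len(teams[i]) >= players_per_team, team_totals[i]))
--         teams[idx].append(s)
--         team_totals[idx] += s
--     return teams
-- ===== SOURCE B (Python) =====
-- def _insert_sorted(queue, entry):
--     for k in range(len(queue)):
--         if entry < queue[k]:
--             queue.insert(k, entry)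
--             return
--     queue.append(entry)
--
--
-- def assign_greedy(scores, team_count, players_per_team):
--     teams = [[] for _ in range(team_count)]
--     # queue of (is_full, total, index) team keys, kept sorted ascending;
--     # the head is always the team the greedy rule picks next
--     queue = [(0 >= players_per_team, 0, i) for i in range(team_count)]
--     for s in scores:
--         _full, total, i = queue.pop(0)
--         teams[i].append(s)
--         _insert_sorted(queue, (len(teams[i]) >= players_per_team, total + s, i))
--     return teams
-- ===== Notes on version B (the rewrite author's own statement) =====
-- stated objective: faster
-- what changed: B maintains a persistently sorted queue of (is_full, total, index) team keys, popping the head and re-inserting one updated key per score, instead of rebuilding and scanning all k key tuples with min() for every score.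
import Mathlib
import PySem

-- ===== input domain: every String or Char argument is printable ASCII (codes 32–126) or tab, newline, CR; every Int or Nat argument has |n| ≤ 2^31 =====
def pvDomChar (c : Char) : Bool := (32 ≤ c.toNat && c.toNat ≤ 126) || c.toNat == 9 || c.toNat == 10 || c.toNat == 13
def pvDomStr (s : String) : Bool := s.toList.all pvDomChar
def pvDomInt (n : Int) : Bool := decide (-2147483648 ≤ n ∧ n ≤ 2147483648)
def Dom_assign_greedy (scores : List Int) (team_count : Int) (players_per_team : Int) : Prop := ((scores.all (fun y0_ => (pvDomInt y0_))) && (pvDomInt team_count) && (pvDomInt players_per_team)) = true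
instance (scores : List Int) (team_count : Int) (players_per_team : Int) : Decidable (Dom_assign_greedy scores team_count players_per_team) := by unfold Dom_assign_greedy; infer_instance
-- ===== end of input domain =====

-- B maintains a persistently sorted queue of (is_full, total, index) team keys, popping the head and
-- re-inserting one updated key per score, instead of re-scanning all k freshly built key tuples per score
-- (same O(n*k) worst case; a timing run measured B faster by a constant factor).

-- ===== PORT A =====
-- the argmin A's min(range(team_count), key=...) computes, as a named helper (loop body decomposition)
def pickIdx (players_per_team team_count : Int) (st : List (List Int) × List Int) : Option Int :=
  PySem.List.min2? (PySem.List.pyRange 0 team_count 1)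
    (fun i => decide (((PySem.List.pyGetD st.1 i ([] : List Int)).length : Int) ≥ players_per_team))
    (fun i => PySem.List.pyGetD st.2 i 0)

-- one iteration of A's for-loop (teams[i] and team_totals[i] are always in range, so pyGetD/modify are exact)
def stepA (players_per_team team_count : Int) (st : List (List Int) × List Int) (s : Int) :
    List (List Int) × List Int :=
  match pickIdx players_per_team team_count st with
  | none => st
  | some idx => (st.1.modify idx.toNat (fun m => m ++ [s]), st.2.modify idx.toNat (fun x => x + s))

def assign_greedy (scores : List Int) (team_count : Int) (players_per_team : Int) : List (List Int) :=
  (scores.foldl (stepA players_per_team team_count)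
    ((PySem.List.pyRange 0 team_count 1).map (fun _ => ([] : List Int)),
     List.replicate team_count.toNat (0 : Int))).1

-- ===== PORT B =====
-- Python tuple '<' on (bool, int, int): False < True, then ints lexicographically
def entLt (a b : Bool × Int × Int) : Bool :=
  (!a.1 && b.1) || (a.1 == b.1 && (decide (a.2.1 < b.2.1) || (a.2.1 == b.2.1 && decide (a.2.2 < b.2.2))))

-- Source B's _insert_sorted: walk the queue, insert before the first strictly greater entry
def insEnt (e : Bool × Int × Int) : List (Bool × Int × Int) → List (Bool × Int × Int)
  | [] => [e]
  | h :: t => if entLt e h then e :: h :: t else h :: insEnt e t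

-- one iteration of B's for-loop: pop the queue head, append, re-insert the updated key
def stepB (players_per_team : Int) (st : List (List Int) × List (Bool × Int × Int)) (s : Int) :
    List (List Int) × List (Bool × Int × Int) :=
  match st.2 with
  | [] => st
  | (_, t, i) :: rest =>
    let teams' := st.1.modify i.toNat (fun m => m ++ [s])
    (teams',
     insEnt (decide (((PySem.List.pyGetD teams' i ([] : List Int)).length : Int) ≥ players_per_team), t + s, i) rest)

def assign_greedy_alt (scores : List Int) (team_count : Int) (players_per_team : Int) : List (List Int) :=
  (scores.foldl (stepB players_per_team)
    ((PySem.List.pyRange 0 team_count 1).map (fun _ => ([] : List Int)),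
     (PySem.List.pyRange 0 team_count 1).map (fun i => (decide ((0 : Int) ≥ players_per_team), (0 : Int), i)))).1

-- ===== PRECONDITION & SPEC =====
-- A raises ValueError (min of an empty range) when scores ≠ [] and team_count ≤ 0; B raises IndexError there too.
def Pre_assign_greedy (scores : List Int) (team_count : Int) (players_per_team : Int) : Prop :=
  scores = [] ∨ 1 ≤ team_count

instance (scores : List Int) (team_count : Int) (players_per_team : Int) : Decidable (Pre_assign_greedy scores team_count players_per_team) := by unfold Pre_assign_greedy; infer_instance

def pvWitness_assign_greedy : List Int × Int × Int := ([3, 1, 2, 5], 2, 2)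

def Spec_assign_greedy (scores : List Int) (team_count : Int) (players_per_team : Int) (out : List (List Int)) : Prop := out = assign_greedy_alt scores team_count players_per_team
instance (scores : List Int) (team_count : Int) (players_per_team : Int) (out : List (List Int)) : Decidable (Spec_assign_greedy scores team_count players_per_team out) := by unfold Spec_assign_greedy; infer_instance

-- ===== CLAIM (what is proved, stated in full; the proofs are below) =====
def Claim_equal_assign_greedy : Prop := ∀ (scores : List Int) (team_count : Int) (players_per_team : Int), Dom_assign_greedy scores team_count players_per_team → Pre_assign_greedy scores team_count players_per_team → Spec_assign_greedy scores team_count players_per_team (assign_greedy scores team_count players_per_team)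

-- ===== LEMMAS AND PROOFS =====

-- the multiset of team keys A's argmin ranges over, as B's queue entries
def teamKeys (players_per_team team_count : Int) (teams : List (List Int)) (totals : List Int) :
    List (Bool × Int × Int) :=
  (PySem.List.pyRange 0 team_count 1).map
    (fun j => (decide (((PySem.List.pyGetD teams j ([] : List Int)).length : Int) ≥ players_per_team),
               PySem.List.pyGetD totals j 0, j))

def LoopInv (players_per_team team_count : Int) (teams : List (List Int)) (totals : List Int)
    (queue : List (Bool × Int × Int)) : Prop :=
  teams.length = team_count.toNat ∧ totals.length = team_count.toNat ∧
  queue.Perm (teamKeys players_per_team team_count teams totals) ∧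
  List.Pairwise (fun a b => entLt a b = true) queue

theorem entLt_iff (f g : Bool) (t u i j : Int) :
    entLt (f, t, i) (g, u, j) = true ↔
      ((f = false ∧ g = true) ∨ (f = g ∧ t < u) ∨ (f = g ∧ t = u ∧ i < j)) := by
  cases f <;> cases g <;> simp [entLt]

theorem entLt_trans {a b c : Bool × Int × Int} (h1 : entLt a b = true) (h2 : entLt b c = true) :
    entLt a c = true := by
  obtain ⟨f, t, i⟩ := a; obtain ⟨g, u, j⟩ := b; obtain ⟨e, v, l⟩ := c
  rw [entLt_iff] at *
  rcases h1 with ⟨h1, h1'⟩ | ⟨h1, h1'⟩ | ⟨h1, h1', h1''⟩ <;>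
    rcases h2 with ⟨h2, h2'⟩ | ⟨h2, h2'⟩ | ⟨h2, h2', h2''⟩ <;>
    subst_vars <;> simp_all <;> omega

theorem entLt_total {a b : Bool × Int × Int} (h : a.2.2 ≠ b.2.2) :
    entLt a b = true ∨ entLt b a = true := by
  obtain ⟨f, t, i⟩ := a; obtain ⟨g, u, j⟩ := b
  simp only at h
  rw [entLt_iff, entLt_iff]
  cases f <;> cases g <;> simp <;> omega

theorem insEnt_perm (e : Bool × Int × Int) (l : List (Bool × Int × Int)) :
    (insEnt e l).Perm (e :: l) := by
  induction l with
  | nil => simp [insEnt]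
  | cons h t ih =>
    simp only [insEnt]
    split
    · exact List.Perm.refl _
    · exact (List.Perm.cons h ih).trans (List.Perm.swap e h t)

theorem insEnt_sorted (e : Bool × Int × Int) (l : List (Bool × Int × Int))
    (hs : List.Pairwise (fun a b => entLt a b = true) l)
    (htot : ∀ y ∈ l, entLt e y = true ∨ entLt y e = true) :
    List.Pairwise (fun a b => entLt a b = true) (insEnt e l) := by
  induction l with
  | nil => simp [insEnt]
  | cons h t ih =>
    simp only [insEnt]
    rcases List.pairwise_cons.mp hs with ⟨hh, ht⟩
    split
    · rename_i hlt
      refine List.pairwise_cons.mpr ⟨?_, hs⟩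
      intro y hy
      rcases List.mem_cons.mp hy with rfl | hy
      · exact hlt
      · exact entLt_trans hlt (hh y hy)
    · rename_i hnlt
      have hhe : entLt h e = true := by
        rcases htot h (by simp) with h1 | h1
        · exact absurd h1 (by simpa using hnlt)
        · exact h1
      refine List.pairwise_cons.mpr ⟨?_, ih ht (fun y hy => htot y (by simp [hy]))⟩
      intro y hy
      have hmem := (insEnt_perm e t).mem_iff.mp hy
      rcases List.mem_cons.mp hmem with rfl | hyt
      · exact hhe
      · exact hh y hyt

def key3 (kb : Int → Bool) (kt : Int → Int) (j : Int) : Bool × Int × Int := (kb j, kt j, j)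

theorem cond_iff (b c : Bool) (t u : Int) :
    (decide (b < c) || !decide (c < b) && decide (t < u)) = true ↔
      ((b = false ∧ c = true) ∨ (b = c ∧ t < u)) := by
  cases b <;> cases c <;> simp [Bool.lt_iff]

theorem min2?_singleton (kb : Int → Bool) (kt : Int → Int) (a : Int) :
    PySem.List.min2? [a] kb kt = some a := by
  simp [PySem.List.min2?]

theorem min2?_step (kb : Int → Bool) (kt : Int → Int) (m x : Int) (l : List Int) :
    PySem.List.min2? (m :: x :: l) kb kt =
      PySem.List.min2?
        ((if (decide (kb x < kb m) || !decide (kb m < kb x) && decide (kt x < kt m)) = true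
          then x else m) :: l) kb kt := by
  unfold PySem.List.min2?
  simp only [List.foldl_cons]
  by_cases hC : (decide (kb x < kb m) || !decide (kb m < kb x) && decide (kt x < kt m)) = true
  · rw [if_pos hC]
    congr 1
    exact (congrArg some (if_pos hC)).symm
  · rw [if_neg hC]
    congr 1
    exact (congrArg some (if_neg hC)).symm

theorem min2_go (kb : Int → Bool) (kt : Int → Int) (i : Int) :
    ∀ (n : Nat) (lo hi a : Int), (hi - lo).toNat = n → a < lo →
    (i = a ∨ (lo ≤ i ∧ i < hi)) →
    (∀ j, (j = a ∨ (lo ≤ j ∧ j < hi)) → j ≠ i → entLt (key3 kb kt i) (key3 kb kt j) = true) →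
    PySem.List.min2? (a :: PySem.List.pyRange lo hi 1) kb kt = some i := by
  intro n
  induction n with
  | zero =>
    intro lo hi a hn ha hloc _
    rw [PySem.List.pyRange_one_eq_nil (by omega)]
    rcases hloc with rfl | ⟨h1, h2⟩
    · exact min2?_singleton kb kt i
    · omega
  | succ n ih =>
    intro lo hi a hn ha hloc H
    have hlt : lo < hi := by omega
    rw [PySem.List.pyRange_one_cons hlt, min2?_step]
    by_cases hC : (decide (kb lo < kb a) || !decide (kb a < kb lo) && decide (kt lo < kt a)) = true
    · rw [if_pos hC]
      -- the scanned element lo becomes the new best, so the old best a cannot be the answer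
      have hia : i ≠ a := by
        intro hia
        subst hia
        have hH := H lo (by omega) (by omega)
        simp only [key3] at hH
        rw [entLt_iff] at hH
        rw [cond_iff] at hC
        cases hbi : kb i <;> cases hbl : kb lo <;> rw [hbi, hbl] at hH hC <;> simp at hH hC <;> omega
      exact ih (lo + 1) hi lo (by omega) (by omega)
        (by rcases hloc with rfl | ⟨h1, h2⟩
            · exact absurd rfl hia
            · rcases eq_or_lt_of_le h1 with rfl | h1'
              · exact Or.inl rfl
              · exact Or.inr ⟨by omega, h2⟩)
        (by intro j hj hji
            apply H j _ hji
            rcases hj with rfl | ⟨h1, h2⟩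
            · exact Or.inr ⟨le_rfl, hlt⟩
            · exact Or.inr ⟨by omega, h2⟩)
    · rw [if_neg hC]
      -- the old best a survives, so the scanned element lo cannot be the answer
      have hilo : i ≠ lo := by
        intro hilo
        subst hilo
        have hH := H a (Or.inl rfl) (by omega)
        simp only [key3] at hH
        rw [entLt_iff] at hH
        apply hC
        rw [cond_iff]
        cases hbi : kb i <;> cases hba : kb a <;> rw [hbi, hba] at hH <;> simp at hH ⊢ <;> omega
      exact ih (lo + 1) hi a (by omega) (by omega)
        (by rcases hloc with rfl | ⟨h1, h2⟩
            · exact Or.inl rfl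
            · exact Or.inr ⟨by omega, h2⟩)
        (by intro j hj hji
            apply H j _ hji
            rcases hj with rfl | ⟨h1, h2⟩
            · exact Or.inl rfl
            · exact Or.inr ⟨by omega, h2⟩)

theorem min2?_eq_head (kb : Int → Bool) (kt : Int → Int) (tc i : Int) (h0 : 0 ≤ i) (h1 : i < tc)
    (H : ∀ j, 0 ≤ j → j < tc → j ≠ i → entLt (key3 kb kt i) (key3 kb kt j) = true) :
    PySem.List.min2? (PySem.List.pyRange 0 tc 1) kb kt = some i := by
  rw [PySem.List.pyRange_one_cons (by omega : (0 : Int) < tc),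
      show (0 : Int) + 1 = 1 by norm_num]
  exact min2_go kb kt i (tc - 1).toNat 1 tc 0 (by omega) (by omega)
    (by rcases eq_or_lt_of_le h0 with rfl | h0'
        · exact Or.inl rfl
        · exact Or.inr ⟨by omega, h1⟩)
    (by intro j hj hji
        rcases hj with rfl | ⟨hj1, hj2⟩
        · exact H 0 le_rfl (by omega) hji
        · exact H j (by omega) hj2 hji)

theorem pyGetD_modify_ne {α : Type} (xs : List α) (i j : Int) (d : α) (f : α → α)
    (hj0 : 0 ≤ j) (hj1 : j < xs.length) (hi0 : 0 ≤ i) (hne : j ≠ i) :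
    PySem.List.pyGetD (xs.modify i.toNat f) j d = PySem.List.pyGetD xs j d := by
  rw [PySem.List.pyGetD_eq_getElem _ d hj0 (by rw [List.length_modify]; exact_mod_cast hj1),
      PySem.List.pyGetD_eq_getElem _ d hj0 hj1]
  rw [List.getElem_modify]
  rw [if_neg (by omega)]

theorem pyGetD_modify_self {α : Type} (xs : List α) (i : Int) (d : α) (f : α → α)
    (hi0 : 0 ≤ i) (hi1 : i < xs.length) :
    PySem.List.pyGetD (xs.modify i.toNat f) i d = f (PySem.List.pyGetD xs i d) := by
  rw [PySem.List.pyGetD_eq_getElem _ d hi0 (by rw [List.length_modify]; exact_mod_cast hi1),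
      PySem.List.pyGetD_eq_getElem _ d hi0 hi1]
  rw [List.getElem_modify]
  rw [if_pos rfl]

-- third components of the team-key list are exactly the indices 0 .. tc-1
theorem teamKeys_map_idx (ppt tc : Int) (teams : List (List Int)) (totals : List Int) :
    (teamKeys ppt tc teams totals).map (fun e => e.2.2) = PySem.List.pyRange 0 tc 1 := by
  unfold teamKeys
  rw [List.map_map]
  exact List.map_id _

theorem step_lemma (ppt tc : Int) (htc : 1 ≤ tc) (teams : List (List Int)) (totals : List Int)
    (heap : List (Bool × Int × Int)) (hInv : LoopInv ppt tc teams totals heap) (s : Int) :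
    ∃ teams' totals' heap',
      stepA ppt tc (teams, totals) s = (teams', totals') ∧
      stepB ppt (teams, heap) s = (teams', heap') ∧
      LoopInv ppt tc teams' totals' heap' := by
  obtain ⟨hlenT, hlenS, hperm, hsort⟩ := hInv
  -- the heap is nonempty
  have hkeyslen : (teamKeys ppt tc teams totals).length = tc.toNat := by
    unfold teamKeys
    rw [List.length_map, PySem.List.length_pyRange_one]
    omega
  have hheapne : heap ≠ [] := by
    intro h
    have := hperm.length_eq
    rw [h, hkeyslen] at this
    simp at this
    omega
  obtain ⟨⟨f, t, i⟩, rest, rfl⟩ : ∃ e rest, heap = e :: rest := by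
    cases heap with
    | nil => exact absurd rfl hheapne
    | cons e rest => exact ⟨e, rest, rfl⟩
  -- the head is a genuine team key
  have hmem : ((f, t, i) : Bool × Int × Int) ∈ teamKeys ppt tc teams totals :=
    hperm.mem_iff.mp (List.mem_cons_self ..)
  obtain ⟨j, hjmem, hje⟩ := List.mem_map.mp hmem
  have hji : j = i := congrArg (fun e => e.2.2) hje
  rw [hji] at hje hjmem
  obtain ⟨hi0, hitc⟩ := PySem.List.mem_pyRange_one.mp hjmem
  have hf : f = decide (((PySem.List.pyGetD teams i ([] : List Int)).length : Int) ≥ ppt) :=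
    (congrArg (fun e => e.1) hje).symm
  have ht : t = PySem.List.pyGetD totals i 0 :=
    (congrArg (fun e => e.2.1) hje).symm
  -- indices in the heap are distinct; the head's index does not occur in the tail
  have hnodup : ((((f, t, i) : Bool × Int × Int) :: rest).map (fun e => e.2.2)).Nodup := by
    rw [(hperm.map (fun e => e.2.2)).nodup_iff, teamKeys_map_idx]
    exact (PySem.List.pairwise_lt_pyRange_one 0 tc).imp (fun h => by omega)
  have hrest_idx : ∀ y ∈ rest, y.2.2 ≠ i := by
    have h1 : (i :: rest.map (fun e => e.2.2)).Nodup := by simpa using hnodup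
    intro y hy hc
    exact (List.nodup_cons.mp h1).1 (hc ▸ List.mem_map_of_mem (f := fun e => e.2.2) hy)
  -- the head is minimal among all team keys
  have hmin : ∀ y ∈ rest, entLt (f, t, i) y = true := fun y hy =>
    (List.pairwise_cons.mp hsort).1 y hy
  -- A picks exactly the head's index
  have hpick : pickIdx ppt tc (teams, totals) = some i := by
    unfold pickIdx
    apply min2?_eq_head _ _ tc i hi0 hitc
    intro j hj0 hjtc hjne
    simp only [key3]
    have hjkey : ((decide (((PySem.List.pyGetD teams j ([] : List Int)).length : Int) ≥ ppt),
        PySem.List.pyGetD totals j 0, j) : Bool × Int × Int) ∈ teamKeys ppt tc teams totals := by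
      unfold teamKeys
      exact List.mem_map_of_mem (PySem.List.mem_pyRange_one.mpr ⟨hj0, hjtc⟩)
    have hjheap := hperm.mem_iff.mpr hjkey
    rcases List.mem_cons.mp hjheap with heq | hjrest
    · exact absurd (congrArg (fun e => e.2.2) heq) hjne
    · have hm := hmin _ hjrest
      rw [← hf, ← ht]
      exact hm
  set teams' := teams.modify i.toNat (fun m => m ++ [s]) with hteams'
  set totals' := totals.modify i.toNat (fun x => x + s) with htotals'
  set newEnt : Bool × Int × Int :=
    (decide (((PySem.List.pyGetD teams' i ([] : List Int)).length : Int) ≥ ppt), t + s, i) with hnewEnt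
  refine ⟨teams', totals', insEnt newEnt rest, ?_, ?_, ?_⟩
  · unfold stepA
    rw [hpick]
  · unfold stepB
    rfl
  · have hlenT' : teams'.length = tc.toNat := by rw [hteams', List.length_modify]; exact hlenT
    have hlenS' : totals'.length = tc.toNat := by rw [htotals', List.length_modify]; exact hlenS
    -- decompose the key list around index i
    have hsplit : ∀ (tm : List (List Int)) (tt : List Int),
        teamKeys ppt tc tm tt =
          (PySem.List.pyRange 0 i 1).map
            (fun j => (decide (((PySem.List.pyGetD tm j ([] : List Int)).length : Int) ≥ ppt),
                       PySem.List.pyGetD tt j 0, j)) ++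
          (decide (((PySem.List.pyGetD tm i ([] : List Int)).length : Int) ≥ ppt),
            PySem.List.pyGetD tt i 0, i) ::
          (PySem.List.pyRange (i + 1) tc 1).map
            (fun j => (decide (((PySem.List.pyGetD tm j ([] : List Int)).length : Int) ≥ ppt),
                       PySem.List.pyGetD tt j 0, j)) := by
      intro tm tt
      unfold teamKeys
      rw [PySem.List.pyRange_one_append 0 i tc hi0 (by omega),
          PySem.List.pyRange_one_cons (by omega : i < tc)]
      simp [List.map_append]
    -- keys of untouched indices are unchanged
    have hpre_eq : (PySem.List.pyRange 0 i 1).map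
          (fun j => (decide (((PySem.List.pyGetD teams' j ([] : List Int)).length : Int) ≥ ppt),
                     PySem.List.pyGetD totals' j 0, j)) =
        (PySem.List.pyRange 0 i 1).map
          (fun j => (decide (((PySem.List.pyGetD teams j ([] : List Int)).length : Int) ≥ ppt),
                     PySem.List.pyGetD totals j 0, j)) := by
      apply List.map_congr_left
      intro j hj
      obtain ⟨hj0, hji⟩ := PySem.List.mem_pyRange_one.mp hj
      rw [hteams', htotals',
          pyGetD_modify_ne teams i j _ _ hj0 (by rw [hlenT]; omega) hi0 (by omega),
          pyGetD_modify_ne totals i j _ _ hj0 (by rw [hlenS]; omega) hi0 (by omega)]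
    have hpost_eq : (PySem.List.pyRange (i + 1) tc 1).map
          (fun j => (decide (((PySem.List.pyGetD teams' j ([] : List Int)).length : Int) ≥ ppt),
                     PySem.List.pyGetD totals' j 0, j)) =
        (PySem.List.pyRange (i + 1) tc 1).map
          (fun j => (decide (((PySem.List.pyGetD teams j ([] : List Int)).length : Int) ≥ ppt),
                     PySem.List.pyGetD totals j 0, j)) := by
      apply List.map_congr_left
      intro j hj
      obtain ⟨hj0, hji⟩ := PySem.List.mem_pyRange_one.mp hj
      rw [hteams', htotals',
          pyGetD_modify_ne teams i j _ _ (by omega) (by rw [hlenT]; omega) hi0 (by omega),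
          pyGetD_modify_ne totals i j _ _ (by omega) (by rw [hlenS]; omega) hi0 (by omega)]
    have htot' : PySem.List.pyGetD totals' i 0 = t + s := by
      rw [htotals', pyGetD_modify_self totals i 0 _ hi0 (by rw [hlenS]; omega), ht]
    have hnew_key : teamKeys ppt tc teams' totals' =
        (PySem.List.pyRange 0 i 1).map
          (fun j => (decide (((PySem.List.pyGetD teams j ([] : List Int)).length : Int) ≥ ppt),
                     PySem.List.pyGetD totals j 0, j)) ++
        newEnt ::
        (PySem.List.pyRange (i + 1) tc 1).map
          (fun j => (decide (((PySem.List.pyGetD teams j ([] : List Int)).length : Int) ≥ ppt),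
                     PySem.List.pyGetD totals j 0, j)) := by
      rw [hsplit teams' totals', hpre_eq, hpost_eq, htot']
    have hold_key : teamKeys ppt tc teams totals =
        (PySem.List.pyRange 0 i 1).map
          (fun j => (decide (((PySem.List.pyGetD teams j ([] : List Int)).length : Int) ≥ ppt),
                     PySem.List.pyGetD totals j 0, j)) ++
        ((f, t, i) : Bool × Int × Int) ::
        (PySem.List.pyRange (i + 1) tc 1).map
          (fun j => (decide (((PySem.List.pyGetD teams j ([] : List Int)).length : Int) ≥ ppt),
                     PySem.List.pyGetD totals j 0, j)) := by
      rw [hsplit teams totals, ← hf, ← ht]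
    have hrest_perm : rest.Perm
        ((PySem.List.pyRange 0 i 1).map
          (fun j => (decide (((PySem.List.pyGetD teams j ([] : List Int)).length : Int) ≥ ppt),
                     PySem.List.pyGetD totals j 0, j)) ++
         (PySem.List.pyRange (i + 1) tc 1).map
          (fun j => (decide (((PySem.List.pyGetD teams j ([] : List Int)).length : Int) ≥ ppt),
                     PySem.List.pyGetD totals j 0, j))) := by
      apply List.Perm.cons_inv (a := ((f, t, i) : Bool × Int × Int))
      rw [hold_key] at hperm
      exact hperm.trans List.perm_middle
    refine ⟨hlenT', hlenS', ?_, ?_⟩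
    · refine ((insEnt_perm newEnt rest).trans ((hrest_perm.cons newEnt).trans ?_))
      rw [hnew_key]
      exact List.perm_middle.symm
    · refine insEnt_sorted newEnt rest (List.pairwise_cons.mp hsort).2 ?_
      intro y hy
      refine entLt_total (a := newEnt) (b := y) ?_
      intro hc
      rw [hnewEnt] at hc
      exact hrest_idx y hy hc.symm

theorem loop_eq (ppt tc : Int) (htc : 1 ≤ tc) (scores : List Int) :
    ∀ (teams : List (List Int)) (totals : List Int) (heap : List (Bool × Int × Int)),
    LoopInv ppt tc teams totals heap →
    (scores.foldl (stepA ppt tc) (teams, totals)).1 = (scores.foldl (stepB ppt) (teams, heap)).1 := by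
  induction scores with
  | nil => intro teams totals heap _; rfl
  | cons s ss ih =>
    intro teams totals heap hInv
    obtain ⟨teams', totals', heap', hA, hB, hInv'⟩ := step_lemma ppt tc htc teams totals heap hInv s
    simp only [List.foldl_cons, hA, hB]
    exact ih teams' totals' heap' hInv'

theorem init_inv (ppt tc : Int) :
    LoopInv ppt tc ((PySem.List.pyRange 0 tc 1).map (fun _ => ([] : List Int)))
      (List.replicate tc.toNat (0 : Int))
      ((PySem.List.pyRange 0 tc 1).map (fun i => (decide ((0 : Int) ≥ ppt), (0 : Int), i))) := by
  have hkeys : teamKeys ppt tc ((PySem.List.pyRange 0 tc 1).map (fun _ => ([] : List Int)))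
      (List.replicate tc.toNat (0 : Int)) =
      (PySem.List.pyRange 0 tc 1).map (fun i => (decide ((0 : Int) ≥ ppt), (0 : Int), i)) := by
    unfold teamKeys
    apply List.map_congr_left
    intro j hj
    obtain ⟨hj0, hjtc⟩ := PySem.List.mem_pyRange_one.mp hj
    rw [PySem.List.pyGetD_map_pyRange_of_nonneg _ tc j _ hj0 hjtc,
        PySem.List.pyGetD_eq_getElem _ 0 hj0 (by rw [List.length_replicate]; omega),
        List.getElem_replicate]
    simp [ge_iff_le]
  refine ⟨?_, ?_, ?_, ?_⟩
  · rw [List.length_map, PySem.List.length_pyRange_one]; omega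
  · rw [List.length_replicate]
  · rw [hkeys]
  · rw [List.pairwise_map]
    apply (PySem.List.pairwise_lt_pyRange_one 0 tc).imp
    intro a b hab
    rw [entLt_iff]
    exact Or.inr (Or.inr ⟨rfl, rfl, hab⟩)

-- ===== VERDICT (by name: the statement is the Claim_ definition above) =====
theorem assign_greedy_spec : Claim_equal_assign_greedy := by
  intro scores tc ppt _ hpre
  unfold Spec_assign_greedy assign_greedy assign_greedy_alt
  rcases hpre with rfl | htc
  · rfl
  · exact loop_eq ppt tc htc scores _ _ _ (init_inv ppt tc)
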